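-- pv_equiv track=rewrite | github.com/lovelydog/chief-of-staff-dashboard | backend/services/style_checker.py | calculate_style_score
-- ===== SOURCE A (Python) =====
-- def calculate_style_score(issues: list[dict]) -> int:
--     """Calculate overall style score based on issues found."""
--     score = 100
--
--     for issue in issues:
--         if issue["severity"] == "high":
--             score -= 20
--         elif issue["severity"] == "medium":
--             score -= 10
--         else:
--             score -= 5
--
--     return max(0, score)
-- ===== SOURCE B (Python) =====
-- def calculate_style_score(issues: list[dict]) -> int:
--     """Calculate overall style score based on issues found."""
--     sevs = [issue["severity"] for issue in issues]
--     counts = {}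
--     for s in sevs:
--         counts[s] = counts.get(s, 0) + 1
--     high = counts.get("high", 0)
--     medium = counts.get("medium", 0)
--     other = len(sevs) - high - medium
--     return max(0, 100 - 20 * high - 10 * medium - 5 * other)
-- ===== Notes on version B (the rewrite author's own statement) =====
-- stated objective: alternative
-- what changed: Replaces the per-issue subtract-accumulate loop by tabulate-then-arithmetic: build a severity frequency table, then compute the score in closed form 100 - 20*high - 10*medium - 5*other with other = total - high - medium.
import Mathlib
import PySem

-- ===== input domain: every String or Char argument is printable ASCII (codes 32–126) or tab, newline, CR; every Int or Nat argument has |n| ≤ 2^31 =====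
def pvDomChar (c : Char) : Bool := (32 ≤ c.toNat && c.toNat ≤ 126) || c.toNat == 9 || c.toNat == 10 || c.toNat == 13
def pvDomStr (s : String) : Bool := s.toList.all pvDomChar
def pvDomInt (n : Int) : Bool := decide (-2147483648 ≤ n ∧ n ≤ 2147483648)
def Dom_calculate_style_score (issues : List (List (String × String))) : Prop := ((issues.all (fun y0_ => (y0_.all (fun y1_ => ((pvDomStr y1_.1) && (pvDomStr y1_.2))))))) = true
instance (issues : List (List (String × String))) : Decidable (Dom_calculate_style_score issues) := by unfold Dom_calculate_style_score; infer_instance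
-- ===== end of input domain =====

-- B replaces A's per-issue subtract-accumulate loop by a severity frequency table plus a closed-form score (alternative decomposition, same cost).


-- ===== PORT A =====
-- issue["severity"] raises KeyError when absent; Pre_ guarantees the key, so getD is exact there.
def calculate_style_score (issues : List (List (String × String))) : Int :=
  let score := issues.foldl (fun s issue =>
    let sev := (PySem.Dict.mk issue).getD "severity" ""
    if sev = "high" then s - 20
    else if sev = "medium" then s - 10
    else s - 5) 100
  max 0 score

-- ===== PORT B =====
def calculate_style_score_alt (issues : List (List (String × String))) : Int :=
  let sevs := issues.map (fun issue => (PySem.Dict.mk issue).getD "severity" "")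
  let counts := sevs.foldl (fun d s => d.modify s 0 (· + 1)) (PySem.Dict.empty : PySem.Dict String Int)
  let high := counts.getD "high" 0
  let medium := counts.getD "medium" 0
  let other := (sevs.length : Int) - high - medium
  max 0 (100 - 20 * high - 10 * medium - 5 * other)

-- ===== PRECONDITION & SPEC =====
-- Pre_ excludes exactly the inputs where the Python raises KeyError: an issue dict without the "severity" key.
def Pre_calculate_style_score (issues : List (List (String × String))) : Prop :=
  ∀ issue ∈ issues, (PySem.Dict.mk issue).contains "severity" = true
instance (issues : List (List (String × String))) : Decidable (Pre_calculate_style_score issues) := by unfold Pre_calculate_style_score; infer_instance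
def pvWitness_calculate_style_score : (List (List (String × String))) := [[("severity", "high")], [("severity", "low")]]
def Spec_calculate_style_score (issues : List (List (String × String))) (out : Int) : Prop := out = calculate_style_score_alt issues
instance (issues : List (List (String × String))) (out : Int) : Decidable (Spec_calculate_style_score issues out) := by unfold Spec_calculate_style_score; infer_instance

-- ===== CLAIM (what is proved, stated in full; the proofs are below) =====
def Claim_equal_calculate_style_score : Prop := ∀ (issues : List (List (String × String))), Dom_calculate_style_score issues → Pre_calculate_style_score issues → Spec_calculate_style_score issues (calculate_style_score issues)

-- ===== LEMMAS AND PROOFS =====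
-- A's accumulate loop over a list of severity strings, in closed form.
theorem score_foldl_closed (l : List String) (a : Int) :
    l.foldl (fun s x => if x = "high" then s - 20 else if x = "medium" then s - 10 else s - 5) a
      = a - 20 * (l.count "high" : Int) - 10 * (l.count "medium" : Int)
        - 5 * ((l.length : Int) - l.count "high" - l.count "medium") := by
  induction l generalizing a with
  | nil => simp
  | cons x t ih =>
    simp only [List.foldl_cons, List.count_cons, List.length_cons, ih]
    by_cases hx : x = "high"
    · simp [hx]; ring
    · by_cases hm : x = "medium"
      · simp [hm]; ring
      · simp [hx, hm]; ring

theorem calculate_style_score_eq (issues : List (List (String × String))) :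
    calculate_style_score issues = calculate_style_score_alt issues := by
  unfold calculate_style_score calculate_style_score_alt
  dsimp only
  refine congrArg (max 0) ?_
  refine ((List.foldl_map
      (f := fun issue => (PySem.Dict.mk issue).getD "severity" "")
      (g := fun s x => if x = "high" then s - 20 else if x = "medium" then s - 10 else s - 5)
      (l := issues) (init := (100 : Int))).symm).trans ?_
  rw [score_foldl_closed]
  simp [PySem.Dict.getD_foldl_modify_add_one, List.length_map]

-- ===== VERDICT (by name: the statement is the Claim_ definition above) =====
theorem calculate_style_score_spec : Claim_equal_calculate_style_score := by
  intro issues _ _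
  exact calculate_style_score_eq issues
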